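-- pv_equiv track=rewrite | github.com/zjkang/algorithm-python | python/array_string/leetcode_1525_number_of_good_ways_to_split_a_string.py | numSplits
-- ===== SOURCE A (Python) =====
-- def numSplits(s: str) -> int:
--     n = len(s)
--     left = [0] * n
--     right = [0] * n
--
--     letters = set()
--     for i in range(n):
--         letters.add(s[i])
--         left[i] = len(letters)
--
--     letters = set()
--     for i in range(n-1, -1, -1):
--         letters.add(s[i])
--         right[i] = len(letters)
--
--     ret = 0
--     for i in range(n-1):
--         if left[i] == right[i+1]:
--             ret += 1
--     return ret
-- ===== SOURCE B (Python) =====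
-- def numSplits(s: str) -> int:
--     cnt = {}
--     for c in s:
--         cnt[c] = cnt.get(c, 0) + 1
--     right_distinct = len(cnt)
--     left = set()
--     res = 0
--     for c in s[:-1]:
--         left.add(c)
--         cnt[c] -= 1
--         if cnt[c] == 0:
--             right_distinct -= 1
--         if len(left) == right_distinct:
--             res += 1
--     return res
-- ===== Notes on version B (the rewrite author's own statement) =====
-- stated objective: simpler
-- what changed: Replaced A's three passes with two prefix/suffix arrays by one counting pass plus one sweep that maintains a live left set and a decremented right counter, no arrays.
import Mathlib
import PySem

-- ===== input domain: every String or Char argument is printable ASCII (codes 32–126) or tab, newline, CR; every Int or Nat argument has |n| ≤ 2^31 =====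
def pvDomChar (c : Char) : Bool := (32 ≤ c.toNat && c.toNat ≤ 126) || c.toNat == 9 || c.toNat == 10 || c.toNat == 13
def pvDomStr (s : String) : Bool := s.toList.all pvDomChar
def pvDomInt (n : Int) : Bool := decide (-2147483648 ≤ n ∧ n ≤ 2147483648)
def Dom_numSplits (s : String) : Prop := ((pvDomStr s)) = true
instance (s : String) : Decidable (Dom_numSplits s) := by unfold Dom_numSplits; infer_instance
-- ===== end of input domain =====

-- B replaces A's three passes and two prefix/suffix arrays by one frequency-count pass plus one
-- sweep maintaining a live left set and a decremented right-distinct counter (simpler, no arrays).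

-- ===== PORT A =====
def numSplits (s : String) : Int :=
  let cs := s.toList
  let n := (cs.length : Int)
  let left := (cs.foldl (fun (st : PySem.Set Char × List Int) c =>
      let letters := PySem.Set.add st.1 c
      (letters, st.2 ++ [PySem.Set.len letters])) (PySem.Set.empty, [])).2
  let right := (cs.reverse.foldl (fun (st : PySem.Set Char × List Int) c =>
      let letters := PySem.Set.add st.1 c
      (letters, PySem.Set.len letters :: st.2)) (PySem.Set.empty, [])).2
  (PySem.List.pyRange 0 (n - 1) 1).foldl
    (fun ret i => if PySem.List.pyGetD left i 0 = PySem.List.pyGetD right (i + 1) 0 then ret + 1 else ret) 0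

-- ===== PORT B =====
def numSplits_alt (s : String) : Int :=
  let cs := s.toList
  let cnt := cs.foldl (fun (d : PySem.Dict Char Int) c => d.insert c (d.getD c 0 + 1)) PySem.Dict.empty
  let fin := (PySem.List.slice cs none (some (-1))).foldl
    (fun (st : PySem.Dict Char Int × PySem.Set Char × Int × Int) c =>
      let left := PySem.Set.add st.2.1 c
      let cnt2 := st.1.insert c (st.1.getD c 0 - 1)
      let rd := if cnt2.getD c 0 = 0 then st.2.2.1 - 1 else st.2.2.1
      let res := if PySem.Set.len left = rd then st.2.2.2 + 1 else st.2.2.2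
      (cnt2, left, rd, res))
    (cnt, PySem.Set.empty, (cnt.size : Int), 0)
  fin.2.2.2

-- ===== PRECONDITION & SPEC =====
def Spec_numSplits (s : String) (out : Int) : Prop := out = numSplits_alt s
instance (s : String) (out : Int) : Decidable (Spec_numSplits s out) := by unfold Spec_numSplits; infer_instance

-- ===== CLAIM (what is proved, stated in full; the proofs are below) =====
def Claim_equal_numSplits : Prop := ∀ (s : String), Dom_numSplits s → Spec_numSplits s (numSplits s)

-- ===== LEMMAS AND PROOFS =====

-- distinct-character count, the common abstraction of both programs
def dd (xs : List Char) : Int := ((PySem.Set.ofList xs).length : Int)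

lemma dd_eq_card (xs : List Char) : dd xs = (xs.toFinset.card : Int) := by
  unfold dd
  congr 1
  rw [← List.toFinset_card_of_nodup (PySem.Set.nodup_ofList xs)]
  congr 1
  ext a
  simp [PySem.Set.mem_ofList]

lemma dd_cons (c : Char) (t : List Char) :
    dd (c :: t) = dd t + (if c ∈ t then 0 else 1) := by
  simp only [dd_eq_card, List.toFinset_cons]
  by_cases h : c ∈ t
  · simp [Finset.insert_eq_self.mpr (List.mem_toFinset.mpr h), h]
  · rw [Finset.card_insert_of_notMem (by simp [h])]
    simp [h]

lemma dd_reverse (xs : List Char) : dd xs.reverse = dd xs := by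
  simp [dd_eq_card]

lemma len_ofList (xs : List Char) : PySem.Set.len (PySem.Set.ofList xs) = dd xs := rfl

-- A's first loop builds left[i] = |distinct of cs[0..i]|
lemma leftFold (cs : List Char) (S : PySem.Set Char) (L : List Int) :
  (cs.foldl (fun (st : PySem.Set Char × List Int) c =>
      let letters := PySem.Set.add st.1 c
      (letters, st.2 ++ [PySem.Set.len letters])) (S, L)).2
  = L ++ (List.range cs.length).map
      (fun i => PySem.Set.len (PySem.Set.update S (cs.take (i+1)))) := by
  induction cs generalizing S L with
  | nil => simp
  | cons c cs ih =>
    simp only [List.foldl_cons]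
    rw [ih]
    simp only [List.length_cons, List.range_succ_eq_map, List.map_cons, List.map_map]
    simp [Function.comp, List.take_succ_cons, PySem.Set.update]

-- A's second loop builds (in reverse) r[i] = |distinct of ds[0..i]| over the reversed string
lemma rightFold (ds : List Char) (S : PySem.Set Char) (R : List Int) :
  (ds.foldl (fun (st : PySem.Set Char × List Int) c =>
      let letters := PySem.Set.add st.1 c
      (letters, PySem.Set.len letters :: st.2)) (S, R)).2
  = ((List.range ds.length).map
      (fun i => PySem.Set.len (PySem.Set.update S (ds.take (i+1))))).reverse ++ R := by
  induction ds generalizing S R with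
  | nil => simp
  | cons c ds ih =>
    simp only [List.foldl_cons]
    rw [ih]
    simp only [List.length_cons, List.range_succ_eq_map, List.map_cons, List.map_map,
      List.reverse_cons]
    simp [Function.comp, List.take_succ_cons, PySem.Set.update]

lemma rightList (cs : List Char) :
  (((List.range cs.length).map
      (fun i => PySem.Set.len (PySem.Set.update PySem.Set.empty (cs.reverse.take (i+1))))).reverse)
  = (List.range cs.length).map (fun i => dd (cs.drop i)) := by
  apply List.ext_getElem
  · simp
  · intro j h1 h2
    simp only [List.length_reverse, List.length_map, List.length_range] at h1 h2
    rw [List.getElem_reverse]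
    simp only [List.getElem_map, List.getElem_range, List.length_map, List.length_range,
      PySem.Set.update_empty, len_ofList]
    have h3 : cs.length - 1 - j + 1 = cs.length - j := by omega
    rw [h3, List.take_reverse, dd_reverse]
    congr 2
    omega

-- A computes the number of indices k < n-1 with |distinct take (k+1)| = |distinct drop (k+1)|
lemma A_eq (s : String) :
  numSplits s = (List.range (s.toList.length - 1)).foldl
     (fun r k => if dd (s.toList.take (k+1)) = dd (s.toList.drop (k+1)) then r + 1 else r) 0 := by
  simp only [numSplits]
  rw [leftFold, rightFold]
  simp only [List.length_reverse, List.nil_append, List.append_nil]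
  rw [rightList]
  simp only [PySem.Set.update_empty, len_ofList]
  rw [PySem.List.pyRange_one]
  rw [List.foldl_map]
  simp only [sub_zero]
  rw [show (((s.toList.length : Int) - 1).toNat) = s.toList.length - 1 by omega]
  apply PySem.List.foldl_congr_mem
  intro acc k hk
  rw [List.mem_range] at hk
  have hk1 : k < s.toList.length := by omega
  have hk2 : k + 1 < s.toList.length := by omega
  rw [show ((0 : Int) + (k : Int)) = (k : Int) by ring,
    show ((k : Int) + 1) = ((k + 1 : Nat) : Int) by push_cast; ring]
  simp only [PySem.List.pyGetD_natCast]
  rw [PySem.List.getD_map_range _ _ _ _ hk1, PySem.List.getD_map_range _ _ _ _ hk2]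

lemma cnt_getD (cs : List Char) (c : Char) :
  (cs.foldl (fun (d : PySem.Dict Char Int) c => d.insert c (d.getD c 0 + 1)) PySem.Dict.empty).getD c 0
    = (cs.count c : Int) := by
  rw [PySem.Dict.getD_foldl_insert_add_one]
  simp

lemma cnt_size (cs : List Char) :
  (((cs.foldl (fun (d : PySem.Dict Char Int) c => d.insert c (d.getD c 0 + 1)) PySem.Dict.empty).size : Int))
    = dd cs := by
  have h : (cs.foldl (fun (d : PySem.Dict Char Int) c => d.insert c (d.getD c 0 + 1)) PySem.Dict.empty).keys
      = PySem.Set.ofList cs := by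
    rw [PySem.Dict.keys_foldl_insert]
    simp [PySem.Set.update_nil_left]
  have h2 : ∀ (d : PySem.Dict Char Int), d.size = d.keys.length := by
    intro d
    simp [PySem.Dict.size, PySem.Dict.keys]
  rw [h2, h]
  rfl

-- B's sweep invariant
lemma bloop (q : List Char) (z : Char) :
  ∀ (p : List Char) (res : Int) (dct : PySem.Dict Char Int),
  (∀ c, dct.getD c 0 = ((q ++ [z]).count c : Int)) →
  ((q.foldl (fun (st : PySem.Dict Char Int × PySem.Set Char × Int × Int) c =>
      let left := PySem.Set.add st.2.1 c
      let cnt2 := st.1.insert c (st.1.getD c 0 - 1)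
      let rd := if cnt2.getD c 0 = 0 then st.2.2.1 - 1 else st.2.2.1
      let res := if PySem.Set.len left = rd then st.2.2.2 + 1 else st.2.2.2
      (cnt2, left, rd, res))
     (dct, PySem.Set.ofList p, dd (q ++ [z]), res)).2.2.2)
  = (List.range q.length).foldl
      (fun r k => if dd (p ++ q.take (k+1)) = dd (q.drop (k+1) ++ [z]) then r + 1 else r) res := by
  induction q with
  | nil => intro p res dct h; simp
  | cons c q ih =>
    intro p res dct h
    have hc0 : dct.getD c 0 - 1 = ((q ++ [z]).count c : Int) := by
      rw [h c, List.cons_append, List.count_cons_self]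
      push_cast
      ring
    have hcd : (dct.insert c (dct.getD c 0 - 1)).getD c 0 = ((q ++ [z]).count c : Int) := by
      rw [PySem.Dict.getD_insert]
      simp [hc0]
    have hdct' : ∀ c', (dct.insert c (dct.getD c 0 - 1)).getD c' 0 = ((q ++ [z]).count c' : Int) := by
      intro c'
      rw [PySem.Dict.getD_insert]
      split
      · next heq => subst heq; exact hc0
      · next hne =>
        have hne2 : ¬ (c = c') := fun hh => hne hh.symm
        rw [h c', List.cons_append]
        simp [List.count_cons, hne2]
    have hrd : (if (dct.insert c (dct.getD c 0 - 1)).getD c 0 = 0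
          then dd ((c :: q) ++ [z]) - 1 else dd ((c :: q) ++ [z])) = dd (q ++ [z]) := by
      rw [hcd, List.cons_append, dd_cons]
      by_cases hm : c ∈ q ++ [z]
      · have hne0 : ¬ ((((q ++ [z]).count c : Int)) = 0) := by
          have := List.count_pos_iff.mpr hm
          omega
        rw [if_neg hne0, if_pos hm]
        ring
      · have he0 : (((q ++ [z]).count c : Int)) = 0 := by
          have := List.count_eq_zero.mpr hm
          omega
        rw [if_pos he0, if_neg hm]
        ring
    have hlen : PySem.Set.len (PySem.Set.add (PySem.Set.ofList p) c) = dd (p ++ [c]) := by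
      rw [← PySem.Set.ofList_append_singleton]
      rfl
    simp only [List.foldl_cons]
    rw [hrd, hlen, ← PySem.Set.ofList_append_singleton, ih (p ++ [c]) _ _ hdct']
    rw [List.length_cons, List.range_succ_eq_map, List.foldl_cons, List.foldl_map]
    congr 1
    funext x y
    rw [List.take_succ_cons, List.drop_succ_cons, ← List.append_cons]

lemma B_eq (s : String) :
  numSplits_alt s = (List.range (s.toList.length - 1)).foldl
     (fun r k => if dd (s.toList.take (k+1)) = dd (s.toList.drop (k+1)) then r + 1 else r) 0 := by
  simp only [numSplits_alt]
  rw [PySem.List.slice_to_neg_one]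
  rcases List.eq_nil_or_concat s.toList with h | ⟨q, z, h⟩
  · rw [h]
    simp
  · have hq : s.toList = q ++ [z] := by rw [h, List.concat_eq_append]
    rw [hq]
    rw [show (q ++ [z]).dropLast = q from by simp]
    rw [cnt_size (q ++ [z])]
    rw [show (PySem.Set.empty : PySem.Set Char) = PySem.Set.ofList ([] : List Char) from rfl]
    rw [bloop q z [] 0 _ (cnt_getD (q ++ [z]))]
    simp only [List.nil_append, List.length_append, List.length_cons, List.length_nil,
      Nat.add_sub_cancel, Nat.zero_add]
    apply PySem.List.foldl_congr_mem
    intro acc k hk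
    rw [List.mem_range] at hk
    rw [List.take_append_of_le_length (by omega), List.drop_append_of_le_length (by omega)]
    rfl

-- ===== VERDICT (by name: the statement is the Claim_ definition above) =====
theorem numSplits_spec : Claim_equal_numSplits := by
  intro s _
  unfold Spec_numSplits
  rw [A_eq, B_eq]
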